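-- pv_equiv track=rewrite | github.com/medialtemporal/chris | matas_file.py | getLongArrayFromString
-- ===== SOURCE A (Python) =====
-- def getLongArrayFromString(a,b,c,d,e,f):
--   #getArrayFromStrings but it also makes the stuff longer so it doesn't instantly end
--   for x in range(3):
--     a+=a
--     b+=b
--     c+=c
--     d+=d
--     e+=e
--     f+=f
--   return getArrayFromStrings(a,b,c,d,e,f)
--
-- def getArrayFromStrings(a, b, c, d, e, f):
--     #This code takes the 6 strings as input, and makes them all into a list, where each element is one line for the output. It also deletes all of the filler lines(lines with only spaces, or vertical bars), and changes all "-" to " " to improve readability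
--     list = []
--     for x in range(len(a)):
--         if(a[x]!='|' and a[x]!=' '):
--             list.append((a[x]+"|"+b[x]+"|"+c[x]+"|"+d[x]+"|"+e[x]+"|"+f[x]).replace('-',' ').replace('>','^'))
--
--     return list
-- ===== SOURCE B (Python) =====
-- def getLongArrayFromString(a, b, c, d, e, f):
--     # One arithmetic loop with modular indexing instead of materialising the
--     # 8x-duplicated strings: position x of s repeated 8 times is s[x % len(s)].
--     n = len(a)
--     out = []
--     for x in range(8 * n):
--         ca = a[x % n]
--         if ca != '|' and ca != ' ':
--             out.append((ca + "|" + b[x % len(b)] + "|" + c[x % len(c)] + "|"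
--                         + d[x % len(d)] + "|" + e[x % len(e)] + "|" + f[x % len(f)])
--                        .replace('-', ' ').replace('>', '^'))
--     return out
-- ===== Notes on version B (the rewrite author's own statement) =====
-- stated objective: alternative
-- what changed: B drops the triple self-concatenation (8x-long strings) and the scan over them: it runs one arithmetic loop over range(8*len(a)) reading each original string directly via modular indexing s[x % len(s)], never materialising the duplicated strings.
import Mathlib
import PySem

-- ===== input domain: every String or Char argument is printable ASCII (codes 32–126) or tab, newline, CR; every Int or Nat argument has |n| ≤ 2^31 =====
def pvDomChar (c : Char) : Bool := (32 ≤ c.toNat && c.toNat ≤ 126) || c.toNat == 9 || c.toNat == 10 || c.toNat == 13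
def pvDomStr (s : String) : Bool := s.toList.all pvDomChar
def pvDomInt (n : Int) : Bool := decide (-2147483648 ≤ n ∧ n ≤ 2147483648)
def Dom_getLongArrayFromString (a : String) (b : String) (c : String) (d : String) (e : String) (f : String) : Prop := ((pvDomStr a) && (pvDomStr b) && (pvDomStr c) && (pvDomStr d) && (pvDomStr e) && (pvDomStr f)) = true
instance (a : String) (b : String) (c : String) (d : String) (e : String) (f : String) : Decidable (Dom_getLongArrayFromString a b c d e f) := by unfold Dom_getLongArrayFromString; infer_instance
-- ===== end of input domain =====

-- B replaces the 8x string duplication and scan by one arithmetic loop with modular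
-- indexing (position x of s repeated 8 times is s[x % len(s)]); objective: alternative.

-- the line both Pythons build for index x: the six chars joined by '|',
-- then .replace('-',' ').replace('>','^')
def pvMkLine (ca cb cc cd ce cf : Char) : String :=
  String.ofList (PySem.Chars.replace (PySem.Chars.replace
    [ca, '|', cb, '|', cc, '|', cd, '|', ce, '|', cf] ['-'] [' ']) ['>'] ['^'])

-- ===== PORT A =====
-- getArrayFromStrings: loop x over range(len a), keep lines whose a[x] is not '|' or ' '
def pvGetArrayFromStrings (a b c d e f : List Char) : List String :=
  (PySem.List.pyRange 0 a.length 1).foldl (fun lst x =>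
    let ca := PySem.List.pyGetD a x '!'   -- in range for x < len a; b..f may raise: Pre_
    if ca ≠ '|' ∧ ca ≠ ' ' then
      lst ++ [pvMkLine ca (PySem.List.pyGetD b x '!') (PySem.List.pyGetD c x '!')
                (PySem.List.pyGetD d x '!') (PySem.List.pyGetD e x '!') (PySem.List.pyGetD f x '!')]
    else lst) []

def getLongArrayFromString (a : String) (b : String) (c : String) (d : String) (e : String) (f : String) : List String :=
  -- for x in range(3): a+=a; b+=b; …  then getArrayFromStrings(a,…,f)
  let st := (PySem.List.pyRange 0 3 1).foldl
    (fun (s : List Char × List Char × List Char × List Char × List Char × List Char) _ =>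
      (s.1 ++ s.1, s.2.1 ++ s.2.1, s.2.2.1 ++ s.2.2.1, s.2.2.2.1 ++ s.2.2.2.1,
       s.2.2.2.2.1 ++ s.2.2.2.2.1, s.2.2.2.2.2 ++ s.2.2.2.2.2))
    (a.toList, b.toList, c.toList, d.toList, e.toList, f.toList)
  pvGetArrayFromStrings st.1 st.2.1 st.2.2.1 st.2.2.2.1 st.2.2.2.2.1 st.2.2.2.2.2

-- ===== PORT B =====
def getLongArrayFromString_alt (a : String) (b : String) (c : String) (d : String) (e : String) (f : String) : List String :=
  let al := a.toList; let bl := b.toList; let cl := c.toList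
  let dl := d.toList; let el := e.toList; let fl := f.toList
  let n := al.length
  (PySem.List.pyRange 0 (8 * n) 1).foldl (fun out x =>
    let ca := PySem.List.pyGetD al (PySem.Int.mod x n) '!'
    if ca ≠ '|' ∧ ca ≠ ' ' then
      out ++ [pvMkLine ca
        (PySem.List.pyGetD bl (PySem.Int.mod x bl.length) '!')
        (PySem.List.pyGetD cl (PySem.Int.mod x cl.length) '!')
        (PySem.List.pyGetD dl (PySem.Int.mod x dl.length) '!')
        (PySem.List.pyGetD el (PySem.Int.mod x el.length) '!')
        (PySem.List.pyGetD fl (PySem.Int.mod x fl.length) '!')]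
    else out) []

-- ===== PRECONDITION & SPEC =====
-- Pre_ excludes exactly the inputs on which A raises IndexError: some non-filler char of a
-- at index i, whose last copy in the 8x-duplicated a sits at 7*len(a)+i, reaches past the
-- end of the 8x-duplicated b..f. On every input where A returns, Pre_ holds.
def Pre_getLongArrayFromString (a : String) (b : String) (c : String) (d : String) (e : String) (f : String) : Prop :=
  ∀ i : Nat, i < a.toList.length →
    (a.toList.getD i '!' ≠ '|' ∧ a.toList.getD i '!' ≠ ' ') →
    (7 * a.toList.length + i < 8 * b.toList.length ∧
     7 * a.toList.length + i < 8 * c.toList.length ∧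
     7 * a.toList.length + i < 8 * d.toList.length ∧
     7 * a.toList.length + i < 8 * e.toList.length ∧
     7 * a.toList.length + i < 8 * f.toList.length)
instance (a : String) (b : String) (c : String) (d : String) (e : String) (f : String) : Decidable (Pre_getLongArrayFromString a b c d e f) := by unfold Pre_getLongArrayFromString; infer_instance

def pvWitness_getLongArrayFromString : String × String × String × String × String × String :=
  ("x-", "y>", "z|", "w ", "v-", "u-")

def Spec_getLongArrayFromString (a : String) (b : String) (c : String) (d : String) (e : String) (f : String) (out : List String) : Prop := out = getLongArrayFromString_alt a b c d e f
instance (a : String) (b : String) (c : String) (d : String) (e : String) (f : String) (out : List String) : Decidable (Spec_getLongArrayFromString a b c d e f out) := by unfold Spec_getLongArrayFromString; infer_instance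

-- ===== CLAIM (what is proved, stated in full; the proofs are below) =====
def Claim_equal_getLongArrayFromString : Prop := ∀ (a : String) (b : String) (c : String) (d : String) (e : String) (f : String), Dom_getLongArrayFromString a b c d e f → Pre_getLongArrayFromString a b c d e f → Spec_getLongArrayFromString a b c d e f (getLongArrayFromString a b c d e f)

-- ===== LEMMAS AND PROOFS =====

theorem pvPyRange3 : PySem.List.pyRange 0 3 1 = [0, 1, 2] := by decide

def pvRep : Nat → List Char → List Char
  | 0, _ => []
  | k + 1, l => l ++ pvRep k l

theorem pvRep_length (k : Nat) (l : List Char) : (pvRep k l).length = k * l.length := by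
  induction k with
  | zero => simp [pvRep]
  | succ k ih => simp [pvRep, ih]; ring

theorem pvRep_getD (k : Nat) (l : List Char) (m : Nat) (d : Char) (h : m < k * l.length) :
    (pvRep k l).getD m d = l.getD (m % l.length) d := by
  induction k generalizing m with
  | zero => omega
  | succ k ih =>
    rw [Nat.succ_mul] at h
    by_cases hm : m < l.length
    · rw [pvRep, List.getD_append _ _ _ _ hm, Nat.mod_eq_of_lt hm]
    · have h1 : l.length ≤ m := Nat.le_of_not_lt hm
      have h2 : m - l.length < k * l.length := by omega
      rw [pvRep, List.getD_append_right _ _ _ _ h1, ih _ h2, Nat.mod_eq_sub_mod h1]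

theorem pvOct (l : List Char) :
    ((l ++ l) ++ (l ++ l)) ++ ((l ++ l) ++ (l ++ l)) = pvRep 8 l := by
  simp [pvRep, List.append_assoc]

theorem pvFoldlCongr {α β : Type} (L : List β) (F G : α → β → α)
    (h : ∀ x ∈ L, ∀ acc, F acc x = G acc x) :
    ∀ init, L.foldl F init = L.foldl G init := by
  induction L with
  | nil => intro _; rfl
  | cons y ys ih =>
    intro init
    rw [List.foldl_cons, List.foldl_cons, h y (List.mem_cons_self)]
    exact ih (fun x hx acc => h x (List.mem_cons_of_mem _ hx) acc) _

theorem pvKey (la lb lc ld le lf : List Char)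
    (hp : ∀ i : Nat, i < la.length →
      (la.getD i '!' ≠ '|' ∧ la.getD i '!' ≠ ' ') →
      (7 * la.length + i < 8 * lb.length ∧ 7 * la.length + i < 8 * lc.length ∧
       7 * la.length + i < 8 * ld.length ∧ 7 * la.length + i < 8 * le.length ∧
       7 * la.length + i < 8 * lf.length)) :
    pvGetArrayFromStrings (pvRep 8 la) (pvRep 8 lb) (pvRep 8 lc) (pvRep 8 ld)
        (pvRep 8 le) (pvRep 8 lf) =
      (PySem.List.pyRange 0 (8 * (la.length : Int)) 1).foldl (fun out x =>
        let ca := PySem.List.pyGetD la (PySem.Int.mod x (la.length : Int)) '!'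
        if ca ≠ '|' ∧ ca ≠ ' ' then
          out ++ [pvMkLine ca
            (PySem.List.pyGetD lb (PySem.Int.mod x (lb.length : Int)) '!')
            (PySem.List.pyGetD lc (PySem.Int.mod x (lc.length : Int)) '!')
            (PySem.List.pyGetD ld (PySem.Int.mod x (ld.length : Int)) '!')
            (PySem.List.pyGetD le (PySem.Int.mod x (le.length : Int)) '!')
            (PySem.List.pyGetD lf (PySem.Int.mod x (lf.length : Int)) '!')]
        else out) [] := by
  unfold pvGetArrayFromStrings
  rw [pvRep_length]
  have hcast : ((8 * la.length : Nat) : Int) = 8 * (la.length : Int) := by push_cast; ring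
  rw [hcast]
  apply pvFoldlCongr
  intro x hx acc
  rw [PySem.List.mem_pyRange_one] at hx
  obtain ⟨h0, h8⟩ := hx
  have hxm : x = (x.toNat : Int) := (Int.toNat_of_nonneg h0).symm
  rw [hxm]
  set m := x.toNat with hmdef
  have hm : m < 8 * la.length := by omega
  have hn : 0 < la.length := by omega
  have hr : m % la.length < la.length := Nat.mod_lt _ hn
  have hdm := Nat.div_add_mod m la.length
  have hq : m / la.length < 8 := (Nat.div_lt_iff_lt_mul hn).mpr (by omega)
  have hle : m ≤ 7 * la.length + m % la.length := by nlinarith [hdm, hq]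
  have hla : PySem.List.pyGetD (pvRep 8 la) (m : Int) '!' = la.getD (m % la.length) '!' := by
    rw [PySem.List.pyGetD_natCast, List.getD]
    exact pvRep_getD 8 la m '!' hm
  have haltA : PySem.List.pyGetD la (PySem.Int.mod (m : Int) (la.length : Int)) '!' =
      la.getD (m % la.length) '!' := by
    rw [PySem.Int.mod_natCast, PySem.List.pyGetD_natCast]
  by_cases hc : la.getD (m % la.length) '!' ≠ '|' ∧ la.getD (m % la.length) '!' ≠ ' '
  · obtain ⟨hb, hcn, hd, he, hf⟩ := hp (m % la.length) hr hc
    have eb : PySem.List.pyGetD (pvRep 8 lb) (m : Int) '!' =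
        PySem.List.pyGetD lb (PySem.Int.mod (m : Int) (lb.length : Int)) '!' := by
      rw [PySem.Int.mod_natCast, PySem.List.pyGetD_natCast, PySem.List.pyGetD_natCast, List.getD]
      exact pvRep_getD 8 lb m '!' (by omega)
    have ec : PySem.List.pyGetD (pvRep 8 lc) (m : Int) '!' =
        PySem.List.pyGetD lc (PySem.Int.mod (m : Int) (lc.length : Int)) '!' := by
      rw [PySem.Int.mod_natCast, PySem.List.pyGetD_natCast, PySem.List.pyGetD_natCast, List.getD]
      exact pvRep_getD 8 lc m '!' (by omega)
    have ed : PySem.List.pyGetD (pvRep 8 ld) (m : Int) '!' =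
        PySem.List.pyGetD ld (PySem.Int.mod (m : Int) (ld.length : Int)) '!' := by
      rw [PySem.Int.mod_natCast, PySem.List.pyGetD_natCast, PySem.List.pyGetD_natCast, List.getD]
      exact pvRep_getD 8 ld m '!' (by omega)
    have ee : PySem.List.pyGetD (pvRep 8 le) (m : Int) '!' =
        PySem.List.pyGetD le (PySem.Int.mod (m : Int) (le.length : Int)) '!' := by
      rw [PySem.Int.mod_natCast, PySem.List.pyGetD_natCast, PySem.List.pyGetD_natCast, List.getD]
      exact pvRep_getD 8 le m '!' (by omega)
    have ef : PySem.List.pyGetD (pvRep 8 lf) (m : Int) '!' =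
        PySem.List.pyGetD lf (PySem.Int.mod (m : Int) (lf.length : Int)) '!' := by
      rw [PySem.Int.mod_natCast, PySem.List.pyGetD_natCast, PySem.List.pyGetD_natCast, List.getD]
      exact pvRep_getD 8 lf m '!' (by omega)
    simp only [hla, haltA, eb, ec, ed, ee, ef]
  · simp only [hla, haltA]
    rw [if_neg hc, if_neg hc]

theorem pvMain (a b c d e f : String)
    (hpre : Pre_getLongArrayFromString a b c d e f) :
    getLongArrayFromString a b c d e f = getLongArrayFromString_alt a b c d e f := by
  unfold getLongArrayFromString getLongArrayFromString_alt
  rw [pvPyRange3]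
  simp only [List.foldl_cons, List.foldl_nil]
  rw [pvOct a.toList, pvOct b.toList, pvOct c.toList, pvOct d.toList, pvOct e.toList,
    pvOct f.toList]
  exact pvKey _ _ _ _ _ _ hpre

-- ===== VERDICT (by name: the statement is the Claim_ definition above) =====
theorem getLongArrayFromString_spec : Claim_equal_getLongArrayFromString := by
  intro a b c d e f _ hpre
  exact pvMain a b c d e f hpre
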